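-- pv_equiv track=rewrite | github.com/OleksandraBylina/Homework9-10 | 0.5.d.lab8.py | det_d
-- ===== SOURCE A (Python) =====
-- def det_d(n):
--     d1 = 0
--     d2 = 1
--     for i in range(3, n+1):
--         dn = -d1
--         d1 = d2
--         d2 = dn
--     return d2
-- ===== SOURCE B (Python) =====
-- def det_d(n):
--     if n < 3:
--         return 1
--     return (1, 0, -1, 0)[(n - 2) % 4]
-- ===== Notes on version B (the rewrite author's own statement) =====
-- stated objective: faster
-- what changed: Replaces the O(n) two-register recurrence loop by an O(1) closed form: the state is periodic with period 4, so the answer is a (n-2) mod 4 lookup in the table (1,0,-1,0), with 1 for n < 3.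
import Mathlib
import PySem

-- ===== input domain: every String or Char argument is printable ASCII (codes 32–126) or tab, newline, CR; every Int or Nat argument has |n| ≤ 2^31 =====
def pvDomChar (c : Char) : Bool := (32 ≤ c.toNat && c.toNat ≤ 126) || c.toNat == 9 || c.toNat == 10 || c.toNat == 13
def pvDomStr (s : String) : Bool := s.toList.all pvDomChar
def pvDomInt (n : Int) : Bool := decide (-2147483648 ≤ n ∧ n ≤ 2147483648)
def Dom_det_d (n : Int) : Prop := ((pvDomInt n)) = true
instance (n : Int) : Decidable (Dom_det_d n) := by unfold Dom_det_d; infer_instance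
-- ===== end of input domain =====

-- B replaces A's O(n) loop with an O(1) (n-2) mod 4 table lookup (the loop state has period 4).

-- ===== PORT A =====
def det_d (n : Int) : Int :=
  ((PySem.List.pyRange 3 (n + 1) 1).foldl (fun (p : Int × Int) _ => (p.2, -p.1)) (0, 1)).2

-- ===== PORT B =====
-- Python's tuple indexing '(1, 0, -1, 0)[r]' (r = (n-2) % 4 ∈ {0,1,2,3}) is ported by hand
-- as the exact 4-way case split; PySem.Int.mod is Python's '%'.
def det_d_alt (n : Int) : Int :=
  if n < 3 then 1
  else
    let r := PySem.Int.mod (n - 2) 4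
    if r = 0 then 1 else if r = 1 then 0 else if r = 2 then -1 else 0

-- ===== PRECONDITION & SPEC =====
def Spec_det_d (n : Int) (out : Int) : Prop := out = det_d_alt n
instance (n : Int) (out : Int) : Decidable (Spec_det_d n out) := by unfold Spec_det_d; infer_instance

-- ===== CLAIM (what is proved, stated in full; the proofs are below) =====
def Claim_equal_det_d : Prop := ∀ (n : Int), Dom_det_d n → Spec_det_d n (det_d n)

-- ===== LEMMAS AND PROOFS =====

-- the loop body of A, as a function of the state only (the range element is ignored)
def pvStep (p : Int × Int) : Int × Int := (p.2, -p.1)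

theorem pv_foldl_const (l : List Int) (s : Int × Int) :
    l.foldl (fun (p : Int × Int) _ => (p.2, -p.1)) s = pvStep^[l.length] s := by
  induction l generalizing s with
  | nil => rfl
  | cons x xs ih => simpa [Function.iterate_succ_apply, pvStep] using ih (pvStep s)

theorem pv_step_four (s : Int × Int) : pvStep^[4] s = s := by
  simp [pvStep, Function.iterate_succ_apply]

theorem pv_iter_mod (k : Nat) : pvStep^[k] ((0 : Int), (1 : Int)) = pvStep^[k % 4] (0, 1) := by
  induction k using Nat.strong_induction_on with
  | _ k ih =>
    by_cases h : k < 4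
    · rw [Nat.mod_eq_of_lt h]
    · have hk : k = (k - 4) + 4 := by omega
      rw [hk, Function.iterate_add_apply, pv_step_four, ih (k - 4) (by omega)]
      congr 1
      omega

theorem det_d_spec' (n : Int) : det_d n = det_d_alt n := by
  unfold det_d det_d_alt
  by_cases h : n < 3
  · rw [PySem.List.pyRange_one_eq_nil (by omega), if_pos h]
    rfl
  · rw [not_lt] at h
    rw [pv_foldl_const, PySem.List.length_pyRange_one]
    have hk : (n + 1 - 3).toNat = (n - 2).toNat := by omega
    have hn2 : ((n - 2).toNat : Int) = n - 2 := by omega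
    rw [hk, pv_iter_mod]
    have hmod : PySem.Int.mod (n - 2) 4 = (((n - 2).toNat % 4 : Nat) : Int) := by
      rw [← hn2]
      exact_mod_cast PySem.Int.mod_natCast (n - 2).toNat 4
    rw [hmod]
    have h4 : (n - 2).toNat % 4 < 4 := Nat.mod_lt _ (by omega)
    interval_cases (n - 2).toNat % 4 <;> simp [pvStep] <;> omega

-- ===== VERDICT (by name: the statement is the Claim_ definition above) =====
theorem det_d_spec : Claim_equal_det_d := by
  intro n _
  exact det_d_spec' n
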